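-- pv_equiv track=rewrite | github.com/openstack/nova | nova/db/sqlalchemy/api.py | _manual_join_columns
-- ===== SOURCE A (Python) =====
-- import copy
--
-- def _manual_join_columns(columns_to_join):
--     """Separate manually joined columns from columns_to_join
--
--     If columns_to_join contains 'metadata', 'system_metadata', or
--     'pci_devices' those columns are removed from columns_to_join and added
--     to a manual_joins list to be used with the _instances_fill_metadata method.
--
--     The columns_to_join formal parameter is copied and not modified, the return
--     tuple has the modified columns_to_join list to be used with joinedload in
--     a model query.
--
--     :param:columns_to_join: List of columns to join in a model query.
--     :return: tuple of (manual_joins, columns_to_join)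
--     """
--     manual_joins = []
--     columns_to_join_new = copy.copy(columns_to_join)
--     for column in ('metadata', 'system_metadata', 'pci_devices'):
--         if column in columns_to_join_new:
--             columns_to_join_new.remove(column)
--             manual_joins.append(column)
--     return manual_joins, columns_to_join_new
-- ===== SOURCE B (Python) =====
-- _MANUAL_JOINS = ('metadata', 'system_metadata', 'pci_devices')
--
--
-- def _manual_join_columns(columns_to_join):
--     """Single pass: skip the first occurrence of each special column while
--     copying, tracking which specials are still pending; manual_joins are the
--     specials that were consumed, in the fixed tuple order."""
--     pending = list(_MANUAL_JOINS)
--     columns_to_join_new = []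
--     for column in columns_to_join:
--         if column in pending:
--             pending.remove(column)
--         else:
--             columns_to_join_new.append(column)
--     manual_joins = [c for c in _MANUAL_JOINS if c not in pending]
--     return manual_joins, columns_to_join_new
-- ===== Notes on version B (the rewrite author's own statement) =====
-- stated objective: alternative
-- what changed: Instead of three membership-test/remove scans over a copy of the list (one per special column), B makes a single pass over columns_to_join that skips the first occurrence of each special column while tracking a pending list, then derives manual_joins from the consumed specials in the fixed tuple order.
import Mathlib
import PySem

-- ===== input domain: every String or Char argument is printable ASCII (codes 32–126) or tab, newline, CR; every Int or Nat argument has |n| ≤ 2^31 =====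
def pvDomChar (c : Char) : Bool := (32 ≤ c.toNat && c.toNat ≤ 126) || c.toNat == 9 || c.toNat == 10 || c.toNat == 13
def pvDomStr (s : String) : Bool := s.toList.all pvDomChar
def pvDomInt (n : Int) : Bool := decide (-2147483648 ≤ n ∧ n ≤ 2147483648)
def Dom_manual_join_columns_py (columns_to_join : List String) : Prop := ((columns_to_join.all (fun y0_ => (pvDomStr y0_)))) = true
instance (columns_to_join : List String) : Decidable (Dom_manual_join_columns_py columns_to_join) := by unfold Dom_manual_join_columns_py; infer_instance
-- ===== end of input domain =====

-- B replaces A's three membership-test/remove scans over the copied list by one pass over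
-- the input that skips the first occurrence of each special column (objective: alternative).

-- ===== PORT A =====
-- for column in ('metadata','system_metadata','pci_devices'):
--   if column in columns_to_join_new: columns_to_join_new.remove(column); manual_joins.append(column)
def manual_join_columns_py (columns_to_join : List String) : List String × List String :=
  (["metadata", "system_metadata", "pci_devices"].foldl
    (fun acc column =>
      if column ∈ acc.2 then
        (acc.1 ++ [column], (PySem.List.remove? acc.2 column).getD acc.2)
      else acc)
    ([], columns_to_join))

-- ===== PORT B =====
def pvSpecials : List String := ["metadata", "system_metadata", "pci_devices"]

-- the loop of Source B: state = (pending, columns_to_join_new-so-far)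
def pvAltLoop (pending : List String) (cols : List String) : List String × List String :=
  match cols with
  | [] => (pending, [])
  | column :: rest =>
    if column ∈ pending then
      pvAltLoop ((PySem.List.remove? pending column).getD pending) rest
    else
      let r := pvAltLoop pending rest
      (r.1, column :: r.2)

def manual_join_columns_py_alt (columns_to_join : List String) : List String × List String :=
  let r := pvAltLoop pvSpecials columns_to_join
  (pvSpecials.filter (fun c => decide (c ∉ r.1)), r.2)

-- ===== PRECONDITION & SPEC =====
def Spec_manual_join_columns_py (columns_to_join : List String) (out : List String × List String) : Prop := out = manual_join_columns_py_alt columns_to_join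
instance (columns_to_join : List String) (out : List String × List String) : Decidable (Spec_manual_join_columns_py columns_to_join out) := by unfold Spec_manual_join_columns_py; infer_instance

-- ===== CLAIM (what is proved, stated in full; the proofs are below) =====
def Claim_equal_manual_join_columns_py : Prop := ∀ (columns_to_join : List String), Dom_manual_join_columns_py columns_to_join → Spec_manual_join_columns_py columns_to_join (manual_join_columns_py columns_to_join)

-- ===== LEMMAS AND PROOFS =====

-- A's guarded remove on a member is List.erase
theorem pvRemoveGetD {l : List String} {v : String} (h : v ∈ l) :
    (PySem.List.remove? l v).getD l = l.erase v := by
  rw [PySem.List.remove?_eq_some_erase l v h]; rfl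

theorem pvFoldlEraseNil (P : List String) : P.foldl List.erase ([] : List String) = [] := by
  induction P with
  | nil => rfl
  | cons c P ih => simpa using ih

theorem pvFoldlEraseConsNotMem (P : List String) (x : String) :
    ∀ t, x ∉ P → P.foldl List.erase (x :: t) = x :: P.foldl List.erase t := by
  induction P with
  | nil => intro t _; rfl
  | cons c P ih =>
    intro t hx
    have hcx : ¬ (x == c) = true := by
      simp only [beq_iff_eq]
      intro h; exact hx (h ▸ List.mem_cons_self)
    simp only [List.foldl_cons, List.erase_cons, hcx]
    exact ih (t.erase c) (fun h => hx (List.mem_cons_of_mem _ h))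

theorem pvFoldlEraseConsMem (P : List String) (x : String) :
    ∀ t, x ∈ P → P.Nodup → P.foldl List.erase (x :: t) = (P.erase x).foldl List.erase t := by
  induction P with
  | nil => intro t h; exact absurd h (List.not_mem_nil)
  | cons c P ih =>
    intro t hx hnd
    by_cases hcx : x = c
    · subst hcx
      simp
    · have hxP : x ∈ P := by
        rcases List.mem_cons.mp hx with h | h
        · exact absurd h hcx
        · exact h
      have hbeq : ¬ (x == c) = true := by simp [beq_iff_eq, hcx]
      have hcb : ¬ (c == x) = true := by simp [beq_iff_eq]; exact fun h => hcx h.symm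
      simp only [List.foldl_cons, List.erase_cons, hbeq, hcb]
      exact ih (t.erase c) hxP hnd.of_cons

-- kept-list invariant of B's loop
theorem pvAltLoopSnd (cols : List String) :
    ∀ P : List String, P.Nodup → (pvAltLoop P cols).2 = P.foldl List.erase cols := by
  induction cols with
  | nil => intro P _; simp [pvAltLoop, pvFoldlEraseNil]
  | cons x t ih =>
    intro P hnd
    by_cases hx : x ∈ P
    · simp only [pvAltLoop, hx, if_pos, pvRemoveGetD hx]
      rw [ih (P.erase x) (hnd.erase x), pvFoldlEraseConsMem P x t hx hnd]
    · simp only [pvAltLoop, hx, if_neg, not_false_iff]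
      rw [pvFoldlEraseConsNotMem P x t hx]
      simp [ih P hnd]

-- pending-list invariant of B's loop
theorem pvAltLoopFst (cols : List String) :
    ∀ P : List String, P.Nodup → ∀ c, c ∈ (pvAltLoop P cols).1 ↔ c ∈ P ∧ c ∉ cols := by
  induction cols with
  | nil => intro P _ c; simp [pvAltLoop]
  | cons x t ih =>
    intro P hnd c
    by_cases hx : x ∈ P
    · simp only [pvAltLoop, hx, if_pos, pvRemoveGetD hx]
      rw [ih (P.erase x) (hnd.erase x) c, hnd.mem_erase_iff]
      constructor
      · rintro ⟨⟨hcx, hcP⟩, hct⟩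
        exact ⟨hcP, by simp [List.mem_cons, hcx, hct]⟩
      · rintro ⟨hcP, hcxt⟩
        simp only [List.mem_cons, not_or] at hcxt
        exact ⟨⟨hcxt.1, hcP⟩, hcxt.2⟩
    · simp only [pvAltLoop, hx, if_neg, not_false_iff]
      rw [ih P hnd c]
      constructor
      · rintro ⟨hcP, hct⟩
        refine ⟨hcP, ?_⟩
        simp only [List.mem_cons, not_or]
        exact ⟨fun h => hx (h ▸ hcP), hct⟩
      · rintro ⟨hcP, hcxt⟩
        simp only [List.mem_cons, not_or] at hcxt
        exact ⟨hcP, hcxt.2⟩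

-- ===== VERDICT (by name: the statement is the Claim_ definition above) =====
theorem manual_join_columns_py_spec : Claim_equal_manual_join_columns_py := by
  intro xs _
  unfold Spec_manual_join_columns_py manual_join_columns_py manual_join_columns_py_alt
  have hnd : pvSpecials.Nodup := by decide
  have hsnd := pvAltLoopSnd xs pvSpecials hnd
  have hfst := pvAltLoopFst xs pvSpecials hnd
  have h1iff := hfst "metadata"
  have h2iff := hfst "system_metadata"
  have h3iff := hfst "pci_devices"
  simp only [pvSpecials, List.mem_cons, List.not_mem_nil, or_false, true_and,
    show ("metadata" = "system_metadata") = False by simp,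
    show ("metadata" = "pci_devices") = False by simp,
    show ("system_metadata" = "metadata") = False by simp,
    show ("system_metadata" = "pci_devices") = False by simp,
    show ("pci_devices" = "metadata") = False by simp,
    show ("pci_devices" = "system_metadata") = False by simp,
    false_or, or_false] at h1iff h2iff h3iff
  simp only [pvSpecials, List.foldl_cons, List.foldl_nil] at hsnd
  by_cases h1 : "metadata" ∈ xs <;>
  by_cases h2 : "system_metadata" ∈ xs <;>
  by_cases h3 : "pci_devices" ∈ xs <;>
    simp_all [pvSpecials, List.foldl_cons, List.foldl_nil, List.filter,
      pvRemoveGetD, List.mem_erase_of_ne, List.erase_of_not_mem,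
      show ("system_metadata" : String) ≠ "metadata" by simp,
      show ("pci_devices" : String) ≠ "metadata" by simp,
      show ("pci_devices" : String) ≠ "system_metadata" by simp]
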